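-- pv_equiv track=rewrite | github.com/teeruth09/OOD_backup | Ch2_Python2/python2.2.py | weirdSubtract
-- ===== SOURCE A (Python) =====
-- def weirdSubtract(n,k):
--     while k != 0:
--         if n % 10 == 0:
--            n = n//10
--            k-=1
--
--         else:
--             n-=1
--             k-=1
--
--
--     return n
-- ===== SOURCE B (Python) =====
-- def weirdSubtract(n, k):
--     # Batch the unit-decrements of a whole phase and exit early once n hits 0.
--     while k > 0:
--         if n == 0:
--             return 0
--         d = n % 10
--         if d == 0:
--             n //= 10
--             k -= 1
--         else:
--             t = min(d, k)
--             n -= t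
--             k -= t
--     return n
-- ===== Notes on version B (the rewrite author's own statement) =====
-- stated objective: faster
-- what changed: Instead of k single-step iterations, B subtracts all unit-digit decrements of a phase in one arithmetic step (t = min(n % 10, k)) and returns immediately once n reaches 0, so the work is bounded by the number of digits of n rather than by k.
import Mathlib
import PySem

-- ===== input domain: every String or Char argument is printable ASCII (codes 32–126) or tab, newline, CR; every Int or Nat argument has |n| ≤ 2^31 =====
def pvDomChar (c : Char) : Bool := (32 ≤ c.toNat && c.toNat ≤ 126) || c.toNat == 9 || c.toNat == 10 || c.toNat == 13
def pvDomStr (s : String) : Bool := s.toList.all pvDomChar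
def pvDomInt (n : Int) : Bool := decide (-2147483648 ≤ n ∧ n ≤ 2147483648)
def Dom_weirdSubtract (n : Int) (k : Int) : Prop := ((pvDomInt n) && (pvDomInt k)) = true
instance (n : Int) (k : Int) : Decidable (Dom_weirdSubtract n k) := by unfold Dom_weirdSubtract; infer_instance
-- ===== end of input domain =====

-- B batches each phase's unit-digit decrements into one subtraction and exits early at n = 0 (faster).


-- ===== PORT A =====
-- A's loop runs exactly k times when k ≥ 0 (each branch does k -= 1); iterated as structural
-- recursion on that count, body transliterated branch for branch.
def wsLoopA : Nat → Int → Int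
  | 0, n => n
  | m + 1, n =>
    if PySem.Int.mod n 10 = 0 then wsLoopA m (PySem.Int.floordiv n 10)
    else wsLoopA m (n - 1)

def weirdSubtract (n : Int) (k : Int) : Int := wsLoopA k.toNat n

-- ===== PORT B =====
def weirdSubtract_alt (n : Int) (k : Int) : Int :=
  if _hk : 0 < k then
    if n = 0 then 0
    else
      let d := PySem.Int.mod n 10
      if d = 0 then weirdSubtract_alt (PySem.Int.floordiv n 10) (k - 1)
      else weirdSubtract_alt (n - min d k) (k - min d k)
  else n
termination_by k.toNat
decreasing_by
  · omega
  · have h0 : 0 ≤ PySem.Int.mod n 10 := PySem.Int.mod_nonneg n (b := 10) (by norm_num)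
    omega

-- ===== PRECONDITION & SPEC =====
-- A's loop decrements k each iteration and stops only at k == 0, so for k < 0 the Python
-- function never returns; Pre_ excludes exactly those inputs.
def Pre_weirdSubtract (n : Int) (k : Int) : Prop := 0 ≤ k
instance (n : Int) (k : Int) : Decidable (Pre_weirdSubtract n k) := by unfold Pre_weirdSubtract; infer_instance
def pvWitness_weirdSubtract : Int × Int := (205, 7)

def Spec_weirdSubtract (n : Int) (k : Int) (out : Int) : Prop := out = weirdSubtract_alt n k
instance (n : Int) (k : Int) (out : Int) : Decidable (Spec_weirdSubtract n k out) := by unfold Spec_weirdSubtract; infer_instance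

-- ===== CLAIM (what is proved, stated in full; the proofs are below) =====
def Claim_equal_weirdSubtract : Prop := ∀ (n : Int) (k : Int), Dom_weirdSubtract n k → Pre_weirdSubtract n k → Spec_weirdSubtract n k (weirdSubtract n k)

-- ===== LEMMAS AND PROOFS =====

theorem wsModE (n : Int) : PySem.Int.mod n 10 = n % 10 :=
  PySem.Int.mod_eq_emod_of_pos (by norm_num)

theorem wsLoopA_zero : ∀ m : Nat, wsLoopA m 0 = 0 := by
  intro m
  induction m with
  | zero => rfl
  | succ m ih => simp [wsLoopA, ih]

-- t consecutive iterations of A's loop are unit decrements while t ≤ n % 10.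
theorem wsLoopA_units : ∀ (t m : Nat) (n : Int), (t : Int) ≤ n % 10 →
    wsLoopA (t + m) n = wsLoopA m (n - t) := by
  intro t
  induction t with
  | zero => intro m n' _; simp
  | succ t ih =>
    intro m n ht
    have hne : PySem.Int.mod n 10 ≠ 0 := by rw [wsModE]; omega
    show wsLoopA (t + 1 + m) n = _
    have harr : t + 1 + m = (t + m) + 1 := by omega
    rw [harr, wsLoopA, if_neg hne]
    have ht' : (t : Int) ≤ (n - 1) % 10 := by omega
    rw [ih m (n - 1) ht']
    congr 1
    push_cast
    ring

theorem wsKey : ∀ (m : Nat) (n k : Int), 0 ≤ k → k.toNat = m →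
    wsLoopA m n = weirdSubtract_alt n k := by
  intro m
  induction m using Nat.strong_induction_on with
  | _ m ih =>
    intro n k hk hm
    rw [weirdSubtract_alt]
    by_cases hkpos : 0 < k
    · rw [dif_pos hkpos]
      obtain ⟨m', rfl⟩ : ∃ m', m = m' + 1 := ⟨m - 1, by omega⟩
      by_cases hn0 : n = 0
      · rw [if_pos hn0, hn0, wsLoopA_zero]
      · rw [if_neg hn0]
        by_cases hd : PySem.Int.mod n 10 = 0
        · simp only [hd, reduceIte]
          rw [wsLoopA, if_pos hd]
          exact ih m' (by omega) _ (k - 1) (by omega) (by omega)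
        · simp only [if_neg hd]
          set d := PySem.Int.mod n 10 with hdef
          have hdb : 0 < d ∧ d < 10 := by
            constructor
            · have := PySem.Int.mod_nonneg n (b := 10) (by norm_num); omega
            · exact PySem.Int.mod_lt n (b := 10) (by norm_num)
          set t : Int := min d k with htdef
          have ht1 : 1 ≤ t := by omega
          have htk : t ≤ k := by omega
          have hsplit : m' + 1 = t.toNat + (k - t).toNat := by omega
          have hcast : ((t.toNat : Int)) = t := by omega
          have hmod : ((t.toNat : Int)) ≤ n % 10 := by rw [hcast]; rw [wsModE] at hdef; omega
          rw [hsplit, wsLoopA_units t.toNat (k - t).toNat n hmod, hcast]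
          exact ih (k - t).toNat (by omega) _ (k - t) (by omega) rfl
    · rw [dif_neg hkpos]
      have : m = 0 := by omega
      rw [this]
      rfl

-- ===== VERDICT (by name: the statement is the Claim_ definition above) =====
theorem weirdSubtract_spec : Claim_equal_weirdSubtract := by
  intro n k _ hpre
  unfold Spec_weirdSubtract weirdSubtract
  exact wsKey k.toNat n k hpre rfl
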